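-- pv_equiv track=rewrite | github.com/ErikCohenDev/advent-of-code-2023 | day1.py | has_spelled_out_numbers
-- ===== SOURCE A (Python) =====
-- def has_spelled_out_numbers(string):
--     """Returns a List of numbers up to 9 that are spelled out in the string"""
--     spelled_out_numbers = [
--         "zero", "one", "two", "three", "four", "five", "six", "seven", "eight", "nine"
--     ]
--     found_numbers = []
--
--     for start_index in range(len(string)):
--         for number, spelled_out_number in enumerate(spelled_out_numbers):
--             if string[start_index:].startswith(spelled_out_number):
--                 found_numbers.append(number)
--
--     return found_numbers
-- ===== SOURCE B (Python) =====
-- def has_spelled_out_numbers(string):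
--     """Returns a List of numbers up to 9 that are spelled out in the string"""
--     words = [
--         "zero", "one", "two", "three", "four", "five", "six", "seven", "eight", "nine"
--     ]
--     hits = []
--     for number, word in enumerate(words):
--         i = string.find(word)
--         while i != -1:
--             hits.append((i, number))
--             i = string.find(word, i + 1)
--     hits.sort(key=lambda hit: hit[0])
--     return [number for _, number in hits]
-- ===== Notes on version B (the rewrite author's own statement) =====
-- stated objective: faster
-- what changed: Replaces the per-position scan that slices the string and tests all ten words at every index with per-word repeated str.find passes collecting (index, number) hits, followed by a stable sort by index.
import Mathlib
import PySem

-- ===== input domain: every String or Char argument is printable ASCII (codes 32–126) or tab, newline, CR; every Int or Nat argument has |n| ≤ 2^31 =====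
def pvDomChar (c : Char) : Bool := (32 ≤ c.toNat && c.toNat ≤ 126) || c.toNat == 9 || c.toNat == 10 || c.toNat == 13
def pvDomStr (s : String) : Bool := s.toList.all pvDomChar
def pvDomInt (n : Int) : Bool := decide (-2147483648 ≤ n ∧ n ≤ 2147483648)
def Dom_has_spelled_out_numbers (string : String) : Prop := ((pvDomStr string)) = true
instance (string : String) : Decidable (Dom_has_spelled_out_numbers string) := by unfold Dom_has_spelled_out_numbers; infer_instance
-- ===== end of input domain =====

-- B replaces A's per-position scan over all ten words by per-word repeated str.find passes
-- collecting (index, number) hits, followed by a stable sort by index (objective: faster).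

-- ===== PORT A =====
def has_spelled_out_numbers (string : String) : List Int :=
  let spelled_out_numbers : List String :=
    ["zero", "one", "two", "three", "four", "five", "six", "seven", "eight", "nine"]
  let found_numbers : List Int := []
  (PySem.List.pyRange 0 (PySem.Str.len string) 1).foldl
    (fun found start_index =>
      (PySem.List.enumerate spelled_out_numbers 0).foldl
        (fun found p =>
          if PySem.Str.startswith (PySem.Str.slice string (some start_index) none) p.2
          then found ++ [p.1] else found)
        found)
    found_numbers

-- ===== PORT B =====
-- the inner `while i != -1` loop of Source B; fuel ≥ len+2 is enough since the search start
-- strictly increases on every iteration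
def pvFindAll (string : String) (number : Int) (word : String) (i : Int) (fuel : Nat) :
    List (Int × Int) :=
  match fuel with
  | 0 => []
  | fuel + 1 =>
    if i = -1 then []
    else (i, number) ::
      pvFindAll string number word (PySem.Str.findFrom string word (i + 1) none) fuel

def has_spelled_out_numbers_alt (string : String) : List Int :=
  let words : List String :=
    ["zero", "one", "two", "three", "four", "five", "six", "seven", "eight", "nine"]
  let hits : List (Int × Int) :=
    (PySem.List.enumerate words 0).foldl
      (fun hits p =>
        hits ++ pvFindAll string p.1 p.2 (PySem.Str.find string p.2) (string.toList.length + 2))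
      []
  (PySem.List.sorted hits (fun hit => hit.1) false).map (fun hit => hit.2)

-- ===== PRECONDITION & SPEC =====
def Spec_has_spelled_out_numbers (string : String) (out : List Int) : Prop := out = has_spelled_out_numbers_alt string
instance (string : String) (out : List Int) : Decidable (Spec_has_spelled_out_numbers string out) := by unfold Spec_has_spelled_out_numbers; infer_instance

-- ===== CLAIM (what is proved, stated in full; the proofs are below) =====
def Claim_equal_has_spelled_out_numbers : Prop := ∀ (string : String), Dom_has_spelled_out_numbers string → Spec_has_spelled_out_numbers string (has_spelled_out_numbers string)

-- ===== LEMMAS AND PROOFS =====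

def pvW : List String :=
  ["zero", "one", "two", "three", "four", "five", "six", "seven", "eight", "nine"]

def pvEW : List (Int × String) := PySem.List.enumerate pvW 0

-- the (position, number) pairs in A's traversal order: by position, then by word number
def pvPairsA (t : List Char) : List (Int × Int) :=
  (List.range t.length).flatMap (fun i =>
    (pvEW.filter (fun p => decide (p.2.toList <+: t.drop i))).map
      (fun p => (((i : Nat) : Int), p.1)))

-- the hits list Source B accumulates, word by word
def pvHits (s : String) : List (Int × Int) :=
  pvEW.flatMap (fun p =>
    pvFindAll s p.1 p.2 (PySem.Str.find s p.2) (s.toList.length + 2))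

lemma pv_flatMap_congr {α β : Type} (l : List α) (f g : α → List β)
    (h : ∀ a ∈ l, f a = g a) : l.flatMap f = l.flatMap g := by
  induction l with
  | nil => rfl
  | cons a l ih =>
    simp only [List.flatMap_cons, h a (List.mem_cons_self), ih (fun b hb => h b (List.mem_cons_of_mem a hb))]

lemma pv_chars_startswith (u w : List Char) :
    PySem.Chars.startswith u w = decide (w <+: u) := by
  rw [Bool.eq_iff_iff]
  simp [PySem.Chars.startswith_iff]

lemma pv_A_eq (s : String) :
    has_spelled_out_numbers s = (pvPairsA s.toList).map (fun q => q.2) := by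
  unfold has_spelled_out_numbers pvPairsA pvEW pvW
  simp only [PySem.List.foldl_append_if, PySem.List.foldl_append_eq_flatMap, List.nil_append,
    PySem.List.pyRange_one, PySem.Str.len_eq, sub_zero, Int.toNat_natCast, zero_add,
    List.flatMap_map, List.map_flatMap, List.map_map]
  apply pv_flatMap_congr
  intro i _
  simp [pv_chars_startswith, Function.comp]

lemma pv_alt_eq (s : String) :
    has_spelled_out_numbers_alt s
      = (PySem.List.sorted (pvHits s) (fun h => h.1) false).map (fun h => h.2) := by
  unfold has_spelled_out_numbers_alt pvHits pvEW pvW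
  simp only [PySem.List.foldl_append_eq_flatMap, List.nil_append]

lemma pv_range_split (n m : Nat) (hm : m ≤ n) :
    List.range n = List.range' 0 m ++ List.range' m (n - m) := by
  have h := @List.range'_append 0 m (n - m) 1
  simp only [Nat.zero_add, Nat.one_mul] at h
  have e : m + (n - m) = n := by omega
  rw [e] at h
  rw [List.range_eq_range', ← h]

lemma pv_filter_range_split (n k r : Nat) (p : Nat → Bool) (hr : r < n) (hkr : k ≤ r)
    (hpr : p r = true) (hmin : ∀ i, k ≤ i → i < r → p i = false) :
    (List.range n).filter (fun i => decide (k ≤ i) && p i)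
      = r :: (List.range n).filter (fun i => decide (r + 1 ≤ i) && p i) := by
  have hR : (List.range n).filter (fun i => decide (r + 1 ≤ i) && p i)
      = (List.range' (r + 1) (n - r - 1)).filter (fun i => decide (k ≤ i) && p i) := by
    rw [pv_range_split n (r + 1) (by omega), List.filter_append]
    have h2 : (List.range' 0 (r + 1)).filter (fun i => decide (r + 1 ≤ i) && p i) = [] := by
      rw [List.filter_eq_nil_iff]
      intro a ha
      rw [List.mem_range'_1] at ha
      simp [show ¬ (r + 1 ≤ a) by omega]
    rw [h2, List.nil_append, show n - (r + 1) = n - r - 1 from by omega]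
    apply List.filter_congr
    intro a ha
    rw [List.mem_range'_1] at ha
    simp [show k ≤ a by omega, show r + 1 ≤ a by omega]
  rw [hR, pv_range_split n r (by omega), List.filter_append]
  have h1 : (List.range' 0 r).filter (fun i => decide (k ≤ i) && p i) = [] := by
    rw [List.filter_eq_nil_iff]
    intro a ha
    rw [List.mem_range'_1] at ha
    by_cases hka : k ≤ a
    · simp [hka, hmin a hka (by omega)]
    · simp [hka]
  rw [h1, List.nil_append,
    show List.range' r (n - r) = r :: List.range' (r + 1) (n - r - 1) from by
      have h := @List.range'_succ r (n - r - 1) 1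
      rw [show n - r - 1 + 1 = n - r from by omega] at h
      simpa using h,
    List.filter_cons]
  rw [if_pos (by simp [hkr, hpr])]

lemma pv_findAll_spec (s : String) (num : Int) (w : String) (hw : w.toList ≠ []) :
    ∀ (fuel k : Nat), k ≤ s.toList.length → s.toList.length - k < fuel →
    pvFindAll s num w (PySem.Str.findFrom s w ((k : Nat) : Int) none) fuel
      = ((List.range s.toList.length).filter
          (fun i => decide (k ≤ i) && decide (w.toList <+: s.toList.drop i))).map
          (fun i => (((i : Nat) : Int), num)) := by
  intro fuel
  induction fuel with
  | zero => intro k hk hf; omega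
  | succ fuel ih =>
    intro k hk hf
    rw [PySem.Str.findFrom_eq]
    by_cases h : PySem.Chars.findFrom s.toList w.toList ((k : Nat) : Int) none = -1
    · have hno : ¬ w.toList <:+: s.toList.drop k :=
        (PySem.Chars.findFrom_natCast_eq_neg_one_iff s.toList w.toList k hk).mp h
      rw [h]
      have hnil : pvFindAll s num w (-1) (fuel + 1) = [] := by simp [pvFindAll]
      rw [hnil]
      symm
      rw [List.map_eq_nil_iff, List.filter_eq_nil_iff]
      intro a _
      simp only [Bool.and_eq_true, decide_eq_true_eq, not_and]
      intro hka hpre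
      exact hno (List.infix_iff_prefix_suffix.mpr ⟨s.toList.drop a, hpre, by
        have : s.toList.drop a = (s.toList.drop k).drop (a - k) := by
          rw [List.drop_drop]; congr 1; omega
        rw [this]; exact List.drop_suffix _ _⟩)
    · obtain ⟨h1, h2, h3⟩ := PySem.Chars.findFrom_natCast_spec s.toList w.toList k hk h
      have hr0 : 0 ≤ PySem.Chars.findFrom s.toList w.toList ((k : Nat) : Int) none :=
        le_trans (by exact_mod_cast Int.natCast_nonneg k) h1
      have hkr : k ≤ (PySem.Chars.findFrom s.toList w.toList ((k : Nat) : Int) none).toNat := by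
        omega
      have hrn : (PySem.Chars.findFrom s.toList w.toList ((k : Nat) : Int) none).toNat
          < s.toList.length := by
        by_contra hh
        push Not at hh
        rw [List.drop_eq_nil_of_le hh] at h2
        exact hw (List.prefix_nil.mp h2)
      simp only [pvFindAll]
      rw [if_neg h]
      have hcast : PySem.Chars.findFrom s.toList w.toList ((k : Nat) : Int) none + 1
          = (((PySem.Chars.findFrom s.toList w.toList ((k : Nat) : Int) none).toNat + 1 : Nat)
              : Int) := by
        omega
      rw [hcast, ih _ (by omega) (by omega)]
      rw [pv_filter_range_split s.toList.length k
        (PySem.Chars.findFrom s.toList w.toList ((k : Nat) : Int) none).toNat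
        (fun i => decide (w.toList <+: s.toList.drop i)) hrn hkr (by simp [h2])
        (fun i hki hir => by simp [h3 i hki hir])]
      rw [List.map_cons, Int.toNat_of_nonneg hr0]

lemma pv_hits_eq (s : String) :
    pvHits s = pvEW.flatMap (fun p =>
      ((List.range s.toList.length).filter
        (fun i => decide (p.2.toList <+: s.toList.drop i))).map
        (fun i => (((i : Nat) : Int), p.1))) := by
  unfold pvHits
  apply pv_flatMap_congr
  intro p hp
  have hw : p.2.toList ≠ [] := by
    have hall : ∀ q ∈ pvEW, q.2.toList ≠ [] := by decide
    exact hall p hp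
  have h0 : PySem.Str.find s p.2 = PySem.Str.findFrom s p.2 ((0 : Nat) : Int) none := by
    rw [PySem.Str.findFrom_eq, PySem.Str.find_eq]
    norm_num [PySem.Chars.findFrom_zero]
  rw [h0, pv_findAll_spec s p.1 p.2 hw _ 0 (Nat.zero_le _) (by omega)]
  apply congrArg
  apply List.filter_congr
  intro x _
  simp

lemma pv_flatMap_split {α β : Type} (l : List α) (f g : α → List β) :
    (l.flatMap fun a => f a ++ g a).Perm (l.flatMap f ++ l.flatMap g) := by
  induction l with
  | nil => simp
  | cons a l ih =>
    simp only [List.flatMap_cons]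
    refine (ih.append_left (f a ++ g a)).trans ?_
    rw [List.append_assoc, List.append_assoc]
    exact (List.perm_append_comm_assoc (g a) (l.flatMap f) (l.flatMap g)).append_left (f a)

lemma pv_flatMap_if_singleton {α β : Type} (l : List α) (q : α → Bool) (h : α → β) :
    (l.flatMap fun a => if q a then [h a] else []) = (l.filter q).map h := by
  induction l with
  | nil => rfl
  | cons a l ih =>
    by_cases hq : q a <;> simp [List.flatMap_cons, hq, ih]

lemma pv_transpose_perm {α β γ : Type} (l : List α) (l' : List β) (P : α → β → Bool)
    (f : α → β → γ) :
    (l.flatMap fun a => ((l'.filter (fun b => P a b)).map (fun b => f a b))).Perm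
      (l'.flatMap fun b => ((l.filter (fun a => P a b)).map (fun a => f a b))) := by
  induction l' with
  | nil => simp
  | cons b bs ih =>
    simp only [List.flatMap_cons]
    have hstep : (l.flatMap fun a => (((b :: bs).filter (fun b' => P a b')).map (fun b' => f a b')))
        = l.flatMap fun a =>
            ((if P a b then [f a b] else []) ++ ((bs.filter (fun b' => P a b')).map (fun b' => f a b'))) := by
      apply pv_flatMap_congr
      intro a _
      by_cases h : P a b <;> simp [h]
    rw [hstep]
    refine (pv_flatMap_split l _ _).trans ?_
    rw [pv_flatMap_if_singleton]
    exact ih.append_left _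

lemma pv_pairwise (t : List Char) :
    (pvPairsA t).Pairwise (fun a b => a.1 < b.1) := by
  unfold pvPairsA
  rw [List.pairwise_flatMap]
  constructor
  · intro i _
    have hinc : pvEW.Pairwise
        (fun p q => ¬(p.2.toList <+: q.2.toList) ∧ ¬(q.2.toList <+: p.2.toList)) := by decide
    have hfil := hinc.filter (fun p => decide (p.2.toList <+: t.drop i))
    have hfalse : (pvEW.filter (fun p => decide (p.2.toList <+: t.drop i))).Pairwise
        (fun _ _ => False) := by
      refine List.Pairwise.imp_of_mem ?_ hfil
      intro a b ha hb hab
      have ha' := (List.mem_filter.mp ha).2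
      have hb' := (List.mem_filter.mp hb).2
      simp only [decide_eq_true_eq] at ha' hb'
      rcases List.prefix_or_prefix_of_prefix ha' hb' with hc | hc
      · exact hab.1 hc
      · exact hab.2 hc
    exact hfalse.map _ (fun a b h => h.elim)
  · refine List.Pairwise.imp ?_ List.pairwise_lt_range
    intro i j hij x hx y hy
    obtain ⟨p, _, rfl⟩ := List.mem_map.mp hx
    obtain ⟨q, _, rfl⟩ := List.mem_map.mp hy
    have hc : ((i : Nat) : Int) < ((j : Nat) : Int) := by exact_mod_cast hij
    exact hc

-- ===== VERDICT (by name: the statement is the Claim_ definition above) =====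
theorem has_spelled_out_numbers_spec : Claim_equal_has_spelled_out_numbers := by
  intro s _
  unfold Spec_has_spelled_out_numbers
  rw [pv_A_eq, pv_alt_eq]
  have hperm : (pvPairsA s.toList).Perm (pvHits s) := by
    rw [pv_hits_eq]
    exact pv_transpose_perm (List.range s.toList.length) pvEW
      (fun i p => decide (p.2.toList <+: s.toList.drop i)) (fun i p => (((i : Nat) : Int), p.1))
  rw [PySem.List.sorted_eq_of_perm_of_pairwise_lt (pvHits s) (pvPairsA s.toList)
    (fun h => h.1) hperm (pv_pairwise s.toList)]
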